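-- pv_equiv track=rewrite | github.com/amew0/autoencoders | utils/classes.py | ksp
-- ===== SOURCE A (Python) =====
-- def ksp(input_size, output_size):
--     possible_params = []
--
--     for k in range(1, input_size):
--         for s in range(1, input_size):
--             for p in range(0, input_size):
--                 if output_size == (input_size - k + 2*p)//s + 1:
--                     possible_params.append((k, s, p))
--     return possible_params
-- ===== SOURCE B (Python) =====
-- def ksp(input_size, output_size):
--     # Same k/s loops, but the inner p-scan is replaced by a computed integer interval.
--     possible_params = []
--     v = output_size - 1
--     for k in range(1, input_size):
--         base = input_size - k
--         for s in range(1, input_size):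
--             lo = -((base - v * s) // 2)            # ceil((v*s - base)/2)
--             hi = (v * s + s - 1 - base) // 2       # floor((v*s + s - 1 - base)/2)
--             for p in range(max(lo, 0), min(hi, input_size - 1) + 1):
--                 possible_params.append((k, s, p))
--     return possible_params
-- ===== Notes on version B (the rewrite author's own statement) =====
-- stated objective: faster
-- what changed: The inner brute-force scan over all paddings p with a floor-division test is replaced by solving the test for p in closed form: for each (k,s) the valid p form an integer interval [ceil((v*s-base)/2), floor((v*s+s-1-base)/2)] clamped to [0, input_size), which is emitted directly.
import Mathlib
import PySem

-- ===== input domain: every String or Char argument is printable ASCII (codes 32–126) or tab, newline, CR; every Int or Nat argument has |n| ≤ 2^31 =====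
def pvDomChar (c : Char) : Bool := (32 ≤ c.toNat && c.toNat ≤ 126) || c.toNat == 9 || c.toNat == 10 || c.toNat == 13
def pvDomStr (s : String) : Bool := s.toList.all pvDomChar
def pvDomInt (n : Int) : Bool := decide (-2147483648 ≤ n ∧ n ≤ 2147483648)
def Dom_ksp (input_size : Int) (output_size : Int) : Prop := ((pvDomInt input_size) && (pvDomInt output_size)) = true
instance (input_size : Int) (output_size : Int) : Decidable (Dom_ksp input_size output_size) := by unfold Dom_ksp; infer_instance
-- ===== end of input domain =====

-- B replaces A's inner brute-force p-scan with a computed integer interval of valid paddings (alternative algorithm, measurably faster on large sizes).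


-- ===== PORT A =====
def ksp (input_size : Int) (output_size : Int) : List (Int × Int × Int) :=
  (PySem.List.pyRange 1 input_size 1).foldl (fun acc k =>
    (PySem.List.pyRange 1 input_size 1).foldl (fun acc s =>
      (PySem.List.pyRange 0 input_size 1).foldl (fun acc p =>
        if output_size = PySem.Int.floordiv (input_size - k + 2 * p) s + 1
        then acc ++ [(k, s, p)] else acc) acc) acc) []

-- ===== PORT B =====
def ksp_alt (input_size : Int) (output_size : Int) : List (Int × Int × Int) :=
  let v := output_size - 1
  (PySem.List.pyRange 1 input_size 1).foldl (fun acc k =>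
    let base := input_size - k
    (PySem.List.pyRange 1 input_size 1).foldl (fun acc s =>
      let lo := -(PySem.Int.floordiv (base - v * s) 2)
      let hi := PySem.Int.floordiv (v * s + s - 1 - base) 2
      (PySem.List.pyRange (max lo 0) (min hi (input_size - 1) + 1) 1).foldl
        (fun acc p => acc ++ [(k, s, p)]) acc) acc) []

-- ===== PRECONDITION & SPEC =====
def Spec_ksp (input_size : Int) (output_size : Int) (out : List (Int × Int × Int)) : Prop := out = ksp_alt input_size output_size
instance (input_size : Int) (output_size : Int) (out : List (Int × Int × Int)) : Decidable (Spec_ksp input_size output_size out) := by unfold Spec_ksp; infer_instance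

-- ===== CLAIM (what is proved, stated in full; the proofs are below) =====
def Claim_equal_ksp : Prop := ∀ (input_size : Int) (output_size : Int), Dom_ksp input_size output_size → Spec_ksp input_size output_size (ksp input_size output_size)

-- ===== LEMMAS AND PROOFS =====

-- Filtering an ascending unit range by an interval condition yields the clamped sub-range.
theorem filter_pyRange_interval (a b lo hi : Int) (cond : Int → Bool)
    (h : ∀ x, a ≤ x → x < b → (cond x = true ↔ lo ≤ x ∧ x ≤ hi)) :
    (PySem.List.pyRange a b 1).filter cond = PySem.List.pyRange (max lo a) (min (hi + 1) b) 1 := by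
  have hnd₁ : ((PySem.List.pyRange a b 1).filter cond).Nodup :=
    (PySem.List.nodup_pyRange_one a b).filter cond
  have hnd₂ := PySem.List.nodup_pyRange_one (max lo a) (min (hi + 1) b)
  have hperm : ((PySem.List.pyRange a b 1).filter cond).Perm
      (PySem.List.pyRange (max lo a) (min (hi + 1) b) 1) := by
    rw [List.perm_ext_iff_of_nodup hnd₁ hnd₂]
    intro x
    simp only [List.mem_filter, PySem.List.mem_pyRange_one]
    constructor
    · rintro ⟨⟨hax, hxb⟩, hc⟩
      have := (h x hax hxb).mp hc
      omega
    · rintro ⟨h1, h2⟩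
      have hax : a ≤ x := by omega
      have hxb : x < b := by omega
      exact ⟨⟨hax, hxb⟩, (h x hax hxb).mpr (by omega)⟩
  have hs₁ : List.Pairwise (· < ·) ((PySem.List.pyRange a b 1).filter cond) :=
    (PySem.List.pairwise_lt_pyRange_one a b).filter cond
  exact hperm.eq_of_pairwise (fun x y _ _ h1 h2 => absurd h1 (not_lt.mpr h2.le)) hs₁
    (PySem.List.pairwise_lt_pyRange_one (max lo a) (min (hi + 1) b))

-- The characterisation of A's inner test as an interval in p, for a fixed k and 0 < s.
theorem cond_iff_interval (input_size output_size k s p : Int) (hs : 0 < s) :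
    (decide (output_size = PySem.Int.floordiv (input_size - k + 2 * p) s + 1) = true) ↔
      (-(PySem.Int.floordiv (input_size - k - (output_size - 1) * s) 2) ≤ p ∧
       p ≤ PySem.Int.floordiv ((output_size - 1) * s + s - 1 - (input_size - k)) 2) := by
  rw [decide_eq_true_eq]
  have h1 : output_size = PySem.Int.floordiv (input_size - k + 2 * p) s + 1 ↔
      PySem.Int.floordiv (input_size - k + 2 * p) s = output_size - 1 := by omega
  rw [h1, PySem.Int.floordiv_eq_iff_of_pos hs]
  have h2 : -(PySem.Int.floordiv (input_size - k - (output_size - 1) * s) 2) ≤ p ↔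
      -p ≤ PySem.Int.floordiv (input_size - k - (output_size - 1) * s) 2 := by omega
  rw [h2, PySem.Int.le_floordiv_iff_mul_le (by omega : (0:Int) < 2),
      PySem.Int.le_floordiv_iff_mul_le (by omega : (0:Int) < 2)]
  constructor <;> intro h <;> constructor <;> nlinarith [h.1, h.2]

-- A's inner p-loop for fixed k, s (with 0 < s) equals B's computed-interval loop.
theorem inner_eq (input_size output_size k s : Int) (hs : 0 < s)
    (acc : List (Int × Int × Int)) :
    (PySem.List.pyRange 0 input_size 1).foldl (fun acc p =>
        if output_size = PySem.Int.floordiv (input_size - k + 2 * p) s + 1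
        then acc ++ [(k, s, p)] else acc) acc =
    (PySem.List.pyRange
        (max (-(PySem.Int.floordiv (input_size - k - (output_size - 1) * s) 2)) 0)
        (min (PySem.Int.floordiv ((output_size - 1) * s + s - 1 - (input_size - k)) 2)
          (input_size - 1) + 1) 1).foldl
      (fun acc p => acc ++ [(k, s, p)]) acc := by
  have hA : (PySem.List.pyRange 0 input_size 1).foldl (fun acc p =>
      if output_size = PySem.Int.floordiv (input_size - k + 2 * p) s + 1
      then acc ++ [(k, s, p)] else acc) acc =
      (PySem.List.pyRange 0 input_size 1).foldl (fun acc p =>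
        if (decide (output_size = PySem.Int.floordiv (input_size - k + 2 * p) s + 1)) = true
        then acc ++ [(k, s, p)] else acc) acc := by
    simp only [decide_eq_true_eq]
  rw [hA, PySem.List.foldl_append_if
      (fun p => decide (output_size = PySem.Int.floordiv (input_size - k + 2 * p) s + 1))
      (fun p => (k, s, p)),
    filter_pyRange_interval 0 input_size
      (-(PySem.Int.floordiv (input_size - k - (output_size - 1) * s) 2))
      (PySem.Int.floordiv ((output_size - 1) * s + s - 1 - (input_size - k)) 2)
      _ (fun x _ _ => cond_iff_interval input_size output_size k s x hs),
    PySem.List.foldl_append_singleton_eq_map (fun p => (k, s, p))]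
  have hb : min (PySem.Int.floordiv ((output_size - 1) * s + s - 1 - (input_size - k)) 2)
        (input_size - 1) + 1 =
      min (PySem.Int.floordiv ((output_size - 1) * s + s - 1 - (input_size - k)) 2 + 1)
        input_size := by omega
  rw [hb]

-- ===== VERDICT (by name: the statement is the Claim_ definition above) =====
theorem ksp_spec : Claim_equal_ksp := by
  intro input_size output_size _
  unfold Spec_ksp ksp ksp_alt
  apply PySem.List.foldl_congr_mem
  intro acc k _
  apply PySem.List.foldl_congr_mem
  intro acc s hsmem
  have hs : 0 < s := (PySem.List.mem_pyRange_one.mp hsmem).1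
  exact inner_eq input_size output_size k s hs acc
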